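-- pv_equiv track=rewrite | github.com/OGalOz/OGUtl | final_transfer/CreateTrieJSON.py | list_of_words_to_lc_to_all_dict
-- ===== SOURCE A (Python) =====
-- from typing import List, Dict
--
-- def list_of_words_to_lc_to_all_dict(L: List[str]) -> Dict[str, List[str]]:
--     op_d: Dict[str, List[str]] = {}
--     for W in L:
--         w = W.lower()
--         if w in op_d:
--             op_d[w].append(W)
--         else:
--             op_d[w] = [W]
--     return op_d
-- ===== SOURCE B (Python) =====
-- from typing import List, Dict
--
-- def list_of_words_to_lc_to_all_dict(L: List[str]) -> Dict[str, List[str]]: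
--     # Repeated partition: peel off the first remaining word's lowercase class,
--     # collect its whole group at once, and continue on what is left.
--     op_d: Dict[str, List[str]] = {}
--     rest = list(L)
--     while rest:
--         w = rest[0].lower()
--         op_d[w] = [x for x in rest if x.lower() == w]
--         rest = [x for x in rest if x.lower() != w]
--     return op_d
-- ===== Notes on version B (the rewrite author's own statement) =====
-- stated objective: alternative
-- what changed: Replaces the single dict-building pass (append/insert per element) with a repeated-partition scheme: peel off the first remaining word's lowercase class, collect its whole group with one filter, and recurse/loop on the rest; first-appearance key order and in-group order are preserved.
import Mathlib
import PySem

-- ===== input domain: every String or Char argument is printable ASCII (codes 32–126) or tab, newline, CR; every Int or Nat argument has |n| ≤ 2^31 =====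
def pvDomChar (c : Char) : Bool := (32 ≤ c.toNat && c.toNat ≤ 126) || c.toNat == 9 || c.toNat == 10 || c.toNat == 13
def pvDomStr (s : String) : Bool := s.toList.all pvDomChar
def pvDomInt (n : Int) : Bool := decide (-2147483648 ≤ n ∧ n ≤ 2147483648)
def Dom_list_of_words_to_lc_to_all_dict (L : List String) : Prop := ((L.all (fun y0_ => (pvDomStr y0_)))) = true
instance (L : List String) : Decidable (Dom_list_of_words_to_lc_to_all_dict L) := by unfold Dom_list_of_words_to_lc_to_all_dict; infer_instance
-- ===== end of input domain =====

-- B replaces A's single dict-building pass by a repeated-partition scheme (peel off each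
-- lowercase class with filters); an alternative of similar size, not claimed faster.


-- ===== PORT A =====
-- one loop iteration: w = W.lower(); if w in op_d: op_d[w].append(W) else: op_d[w] = [W]
def pvStepA (d : PySem.Dict String (List String)) (W : String) : PySem.Dict String (List String) :=
  let w := PySem.Str.lower W
  if d.contains w then d.modify w [] (· ++ [W]) else d.insert w [W]

def list_of_words_to_lc_to_all_dict (L : List String) : List (String × List String) :=
  (L.foldl pvStepA PySem.Dict.empty).items

-- ===== PORT B =====
-- while rest: w = rest[0].lower(); op_d[w] = [x for x in rest if x.lower()==w]; rest = [x ... != w]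
def list_of_words_to_lc_to_all_dict_alt : List String → List (String × List String)
  | [] => []
  | W :: T =>
    let w := PySem.Str.lower W
    (w, W :: T.filter (fun x => PySem.Str.lower x == w)) ::
      list_of_words_to_lc_to_all_dict_alt (T.filter (fun x => PySem.Str.lower x != w))
  termination_by L => L.length
  decreasing_by
    simp only [List.length_unattach]
    exact Nat.lt_succ_of_le (le_trans (List.length_filter_le _ _) (le_of_eq List.length_attach))

-- ===== PRECONDITION & SPEC =====
def Spec_list_of_words_to_lc_to_all_dict (L : List String) (out : List (String × List String)) : Prop := out = list_of_words_to_lc_to_all_dict_alt L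
instance (L : List String) (out : List (String × List String)) : Decidable (Spec_list_of_words_to_lc_to_all_dict L out) := by unfold Spec_list_of_words_to_lc_to_all_dict; infer_instance

-- ===== CLAIM (what is proved, stated in full; the proofs are below) =====
def Claim_equal_list_of_words_to_lc_to_all_dict : Prop := ∀ (L : List String), Dom_list_of_words_to_lc_to_all_dict L → Spec_list_of_words_to_lc_to_all_dict L (list_of_words_to_lc_to_all_dict L)

-- ===== LEMMAS AND PROOFS =====

-- Invariant of A's loop: running it from any dict d with distinct keys appends each existing
-- entry's lowercase matches, and the fresh-key part of the result is exactly B's recursion.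
theorem pvFold_items (L : List String) (d : PySem.Dict String (List String))
    (hnd : d.keys.Nodup) :
    (L.foldl pvStepA d).items
      = d.items.map (fun p => (p.1, p.2 ++ L.filter (fun x => PySem.Str.lower x == p.1)))
        ++ list_of_words_to_lc_to_all_dict_alt
             (L.filter (fun x => d.contains (PySem.Str.lower x) == false)) := by
  induction L generalizing d with
  | nil =>
    simp [list_of_words_to_lc_to_all_dict_alt]
  | cons W T ih =>
    simp only [List.foldl_cons]
    by_cases hc : d.contains (PySem.Str.lower W) = true
    · have hstep : pvStepA d W
          = d.insert (PySem.Str.lower W) (d.getD (PySem.Str.lower W) [] ++ [W]) := by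
        simp only [pvStepA, hc, if_true]; rfl
      rw [hstep, ih _ (PySem.Dict.nodup_keys_insert _ _ _ hnd)]
      rw [PySem.Dict.items_insert_of_contains _ _ hc]
      congr 1
      · rw [List.map_map]
        refine List.map_congr_left ?_
        rintro ⟨k, v⟩ hp
        by_cases hk : k = PySem.Str.lower W
        · subst hk
          have hval : d.getD (PySem.Str.lower W) [] = v := PySem.Dict.getD_of_mem_items d hp hnd []
          simp [hval]
        · simp [hk, Ne.symm hk]
      · have h2 : ∀ x ∈ T,
            ((d.insert (PySem.Str.lower W) (d.getD (PySem.Str.lower W) [] ++ [W])).contains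
                (PySem.Str.lower x) == false)
              = (d.contains (PySem.Str.lower x) == false) := by
          intro x _
          rw [PySem.Dict.contains_insert]
          by_cases hxw : PySem.Str.lower x = PySem.Str.lower W
          · simp [hxw, hc]
          · simp [hxw]
        rw [List.filter_congr h2, List.filter_cons]
        simp [hc]
    · have hstep : pvStepA d W = d.insert (PySem.Str.lower W) [W] := by
        simp only [pvStepA, Bool.not_eq_true] at *; simp [hc]
      have hcf : d.contains (PySem.Str.lower W) = false := by simpa using hc
      rw [hstep, ih _ (PySem.Dict.nodup_keys_insert _ _ _ hnd)]
      rw [PySem.Dict.items_insert_of_not_contains _ _ hcf, List.map_append]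
      have hmap : List.map (fun p => (p.1, p.2 ++ List.filter (fun x => PySem.Str.lower x == p.1) T)) d.items
          = List.map (fun p => (p.1, p.2 ++ List.filter (fun x => PySem.Str.lower x == p.1) (W :: T))) d.items := by
        refine List.map_congr_left ?_
        rintro ⟨k, v⟩ hp
        have hkmem : k ∈ d.keys := PySem.Dict.mem_keys_of_mem_items d hp
        have hkW : (PySem.Str.lower W == k) = false := by
          refine beq_eq_false_iff_ne.mpr ?_
          intro h
          rw [← h] at hkmem
          rw [(PySem.Dict.contains_iff_mem_keys d (PySem.Str.lower W)).symm] at hkmem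
          rw [hkmem] at hcf
          exact Bool.true_eq_false.mp hcf
        simp [hkW]
      rw [hmap, List.append_assoc]
      congr 1
      conv_rhs => rw [List.filter_cons]
      simp only [hcf, beq_self_eq_true, if_true]
      rw [list_of_words_to_lc_to_all_dict_alt]
      have hA1 : List.filter (fun x => PySem.Str.lower x == PySem.Str.lower W)
            (List.filter (fun x => d.contains (PySem.Str.lower x) == false) T)
          = List.filter (fun x => PySem.Str.lower x == PySem.Str.lower W) T := by
        rw [List.filter_filter]
        refine List.filter_congr ?_
        intro x _
        by_cases hxw : PySem.Str.lower x = PySem.Str.lower W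
        · simp [hxw, hcf]
        · simp [hxw]
      have hA2 : List.filter (fun x => PySem.Str.lower x != PySem.Str.lower W)
            (List.filter (fun x => d.contains (PySem.Str.lower x) == false) T)
          = List.filter (fun x => (d.insert (PySem.Str.lower W) [W]).contains (PySem.Str.lower x) == false) T := by
        rw [List.filter_filter]
        refine List.filter_congr ?_
        intro x _
        rw [PySem.Dict.contains_insert]
        by_cases hxw : PySem.Str.lower x = PySem.Str.lower W
        · simp [hxw, hcf]
        · simp [bne]
      rw [hA1, hA2]
      simp

theorem list_of_words_to_lc_to_all_dict_spec : Claim_equal_list_of_words_to_lc_to_all_dict := by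
  intro L _
  unfold Spec_list_of_words_to_lc_to_all_dict list_of_words_to_lc_to_all_dict
  rw [pvFold_items L PySem.Dict.empty PySem.Dict.nodup_keys_empty]
  simp [PySem.Dict.empty]
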